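-- pv_equiv track=rewrite | github.com/kbaikov/adventofcode2024 | day07.py | is_valid_recursive
-- ===== SOURCE A (Python) =====
-- Coefficients = tuple[int, ...]
--
-- def is_valid_recursive(test_value: int, coefficients: Coefficients) -> bool:
--     """From https://www.youtube.com/watch?v=pSqvQiqOVO0"""
--     if len(coefficients) == 1:
--         return test_value == coefficients[0]
--     if is_valid_recursive(
--         test_value, (coefficients[0] + coefficients[1], *coefficients[2:])
--     ):
--         return True
--     if is_valid_recursive(
--         test_value, (coefficients[0] * coefficients[1], *coefficients[2:])
--     ):
--         return True
--     return False
-- ===== SOURCE B (Python) =====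
-- def is_valid_recursive(test_value: int, coefficients) -> bool:
--     results = {coefficients[0]}
--     for c in coefficients[1:]:
--         results = {op for r in results for op in (r + c, r * c)}
--     return test_value in results
-- ===== Notes on version B (the rewrite author's own statement) =====
-- stated objective: alternative
-- what changed: Replaces the binary recursion that rebuilds coefficient tuples with a single forward pass maintaining the set of all left-to-right reachable partial values, then a membership test.
import Mathlib
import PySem

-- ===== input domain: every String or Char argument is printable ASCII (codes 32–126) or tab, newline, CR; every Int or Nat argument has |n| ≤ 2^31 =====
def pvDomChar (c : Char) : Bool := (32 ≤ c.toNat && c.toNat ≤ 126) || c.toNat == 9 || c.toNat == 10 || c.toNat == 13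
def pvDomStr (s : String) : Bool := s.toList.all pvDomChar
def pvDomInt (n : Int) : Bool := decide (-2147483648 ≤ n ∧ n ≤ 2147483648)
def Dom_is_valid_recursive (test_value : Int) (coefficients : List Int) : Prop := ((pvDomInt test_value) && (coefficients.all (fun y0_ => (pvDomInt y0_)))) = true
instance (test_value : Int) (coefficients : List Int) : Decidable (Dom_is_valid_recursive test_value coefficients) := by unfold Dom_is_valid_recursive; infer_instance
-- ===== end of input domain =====

-- B replaces A's exponential binary recursion by one forward pass over the coefficients
-- maintaining the set of left-to-right reachable partial values (objective: alternative).


-- ===== PORT A =====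
def is_valid_recursive (test_value : Int) (coefficients : List Int) : Bool :=
  match coefficients with
  | [c0] => test_value == c0                 -- len(coefficients) == 1
  | c0 :: c1 :: rest =>
      if is_valid_recursive test_value ((c0 + c1) :: rest) then true
      else if is_valid_recursive test_value ((c0 * c1) :: rest) then true
      else false
  | [] => false                              -- Python raises IndexError here; excluded by Pre_
termination_by coefficients.length
decreasing_by all_goals simp

-- ===== PORT B =====
-- one loop step: {op for r in results for op in (r + c, r * c)}
def pvAltStep (results : PySem.Set Int) (c : Int) : PySem.Set Int :=
  PySem.Set.ofList (results.flatMap (fun r => [r + c, r * c]))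

def is_valid_recursive_alt (test_value : Int) (coefficients : List Int) : Bool :=
  match coefficients with
  | [] => false                              -- Python raises IndexError here; excluded by Pre_
  | c0 :: rest =>
      PySem.Set.contains (rest.foldl pvAltStep (PySem.Set.ofList [c0])) test_value

-- ===== PRECONDITION & SPEC =====
-- Pre_ excludes only the empty coefficient list, on which both Pythons raise IndexError.
def Pre_is_valid_recursive (test_value : Int) (coefficients : List Int) : Prop := coefficients ≠ []
instance (test_value : Int) (coefficients : List Int) : Decidable (Pre_is_valid_recursive test_value coefficients) := by unfold Pre_is_valid_recursive; infer_instance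
def pvWitness_is_valid_recursive : Int × List Int := (11, [2, 3, 5])

def Spec_is_valid_recursive (test_value : Int) (coefficients : List Int) (out : Bool) : Prop := out = is_valid_recursive_alt test_value coefficients
instance (test_value : Int) (coefficients : List Int) (out : Bool) : Decidable (Spec_is_valid_recursive test_value coefficients out) := by unfold Spec_is_valid_recursive; infer_instance

-- ===== CLAIM (what is proved, stated in full; the proofs are below) =====
def Claim_equal_is_valid_recursive : Prop := ∀ (test_value : Int) (coefficients : List Int), Dom_is_valid_recursive test_value coefficients → Pre_is_valid_recursive test_value coefficients → Spec_is_valid_recursive test_value coefficients (is_valid_recursive test_value coefficients)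

-- ===== LEMMAS AND PROOFS =====
theorem isvr_single (t a : Int) : is_valid_recursive t [a] = (t == a) := by
  simp [is_valid_recursive]

theorem isvr_cons (t a b : Int) (rest : List Int) :
    is_valid_recursive t (a :: b :: rest) =
      (is_valid_recursive t ((a + b) :: rest) || is_valid_recursive t ((a * b) :: rest)) := by
  rw [is_valid_recursive]
  split_ifs <;> simp_all

theorem mem_altStep (S : PySem.Set Int) (c x : Int) :
    x ∈ pvAltStep S c ↔ ∃ a ∈ S, x = a + c ∨ x = a * c := by
  simp [pvAltStep, PySem.Set.mem_ofList, List.mem_flatMap]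

theorem mem_fold_iff (t : Int) (rest : List Int) :
    ∀ (S : PySem.Set Int),
      (t ∈ rest.foldl pvAltStep S) ↔ ∃ a ∈ S, is_valid_recursive t (a :: rest) = true := by
  induction rest with
  | nil =>
      intro S
      simp [isvr_single]
  | cons c rest ih =>
      intro S
      simp only [List.foldl_cons, ih (pvAltStep S c)]
      constructor
      · rintro ⟨b, hb, hA⟩
        obtain ⟨a, ha, hab⟩ := (mem_altStep S c b).1 hb
        refine ⟨a, ha, ?_⟩
        rw [isvr_cons]
        rcases hab with rfl | rfl
        · simp [hA]
        · simp [hA]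
      · rintro ⟨a, ha, hA⟩
        rw [isvr_cons] at hA
        rcases Bool.or_eq_true_iff.1 hA with h | h
        · exact ⟨a + c, (mem_altStep S c _).2 ⟨a, ha, Or.inl rfl⟩, h⟩
        · exact ⟨a * c, (mem_altStep S c _).2 ⟨a, ha, Or.inr rfl⟩, h⟩

-- ===== VERDICT (by name: the statement is the Claim_ definition above) =====
theorem is_valid_recursive_spec : Claim_equal_is_valid_recursive := by
  intro t cs _hDom hPre
  unfold Spec_is_valid_recursive
  match cs with
  | [] => exact absurd rfl hPre
  | c0 :: rest =>
      simp only [is_valid_recursive_alt]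
      rw [show ∀ (s : PySem.Set Int) x, PySem.Set.contains s x = decide (x ∈ s) from fun s x => by by_cases h : x ∈ s <;> simp [h]]
      by_cases h : is_valid_recursive t (c0 :: rest) = true
      · rw [h]
        symm
        rw [decide_eq_true_iff, mem_fold_iff]
        exact ⟨c0, by simp [PySem.Set.mem_ofList], h⟩
      · rw [Bool.not_eq_true] at h
        rw [h]
        symm
        rw [decide_eq_false_iff_not, mem_fold_iff]
        rintro ⟨a, ha, hA⟩
        simp [PySem.Set.mem_ofList] at ha
        subst ha
        rw [hA] at h; exact absurd h (by simp)
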